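-- pv_equiv track=rewrite | github.com/cirosantilli/project-euler-solvers | solvers/301.py | solve
-- ===== SOURCE A (Python) =====
-- def evaluate(n1, n2, n3):
--     return n1 ^ n2 ^ n3
--
-- def solve(exponent: int) -> int:
--     lost = 0
--     n = 1 << exponent
--     while n > 0:
--         if evaluate(n, 2 * n, 3 * n) == 0:
--             lost += 1
--         n -= 1
--     return lost
-- ===== SOURCE B (Python) =====
-- def solve(exponent: int) -> int:
--     # n ^ 2n ^ 3n == 0 iff n has no two adjacent set bits; the count of such n
--     # in [1, 2**exponent] is the Fibonacci number F(exponent+2).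
--     a, b = 1, 1
--     for _ in range(exponent):
--         a, b = b, a + b
--     return b
-- ===== Notes on version B (the rewrite author's own statement) =====
-- stated objective: faster
-- what changed: Replaced the exhaustive loop testing every n up to 2**exponent with the closed-form Fibonacci recurrence: the qualifying n are exactly those with no two adjacent set bits, and their count is the Fibonacci number of index exponent+2; intended as faster (a timing run saw A time out at exponent 16 where B returned instantly, but could not record a ratio).
import Mathlib
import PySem

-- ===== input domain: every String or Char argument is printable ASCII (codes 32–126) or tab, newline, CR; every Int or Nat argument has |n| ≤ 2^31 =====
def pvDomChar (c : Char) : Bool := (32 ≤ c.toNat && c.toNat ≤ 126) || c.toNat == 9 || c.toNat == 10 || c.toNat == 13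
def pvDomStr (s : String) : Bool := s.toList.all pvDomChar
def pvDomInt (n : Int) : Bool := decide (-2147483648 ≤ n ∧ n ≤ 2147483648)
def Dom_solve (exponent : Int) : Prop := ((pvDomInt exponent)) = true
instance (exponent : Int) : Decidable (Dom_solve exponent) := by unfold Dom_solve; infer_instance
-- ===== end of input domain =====

-- B replaces A's exhaustive scan over all n up to 2^exponent by the Fibonacci
-- recurrence (the n with n^2n^3n==0 are exactly the fibbinary numbers);
-- intended as faster (measured: A timed out at exponent 16 where B returned).


-- ===== PORT A =====
-- the while loop, as recursion on the current value of n (it counts down to 0);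
-- evaluate(n1,n2,n3) = n1 ^ n2 ^ n3 is inlined as nested PySem.Int.bxor
def solveGo : Nat → Int → Int
  | 0, lost => lost
  | Nat.succ k, lost =>
    let n : Int := ((k + 1 : Nat) : Int)
    solveGo k (if PySem.Int.bxor (PySem.Int.bxor n (2 * n)) (3 * n) = 0 then lost + 1 else lost)

def solve (exponent : Int) : Int := solveGo (1 <<< exponent.toNat) 0

-- ===== PORT B =====
-- the for loop over range(exponent) maintaining the pair (a, b)
def fibGo : Nat → Int × Int
  | 0 => (1, 1)
  | Nat.succ k => let p := fibGo k; (p.2, p.1 + p.2)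

def solve_alt (exponent : Int) : Int := (fibGo exponent.toNat).2

-- ===== PRECONDITION & SPEC =====
-- Pre_ excludes negative exponents, on which Python's '1 << exponent' raises ValueError
def Pre_solve (exponent : Int) : Prop := 0 ≤ exponent
instance (exponent : Int) : Decidable (Pre_solve exponent) := by unfold Pre_solve; infer_instance
def pvWitness_solve : Int := (4)

def Spec_solve (exponent : Int) (out : Int) : Prop := out = solve_alt exponent
instance (exponent : Int) (out : Int) : Decidable (Spec_solve exponent out) := by unfold Spec_solve; infer_instance

-- ===== CLAIM (what is proved, stated in full; the proofs are below) =====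
def Claim_equal_solve : Prop := ∀ (exponent : Int), Dom_solve exponent → Pre_solve exponent → Spec_solve exponent (solve exponent)

-- ===== LEMMAS AND PROOFS =====

-- ---- arithmetic/bitwise groundwork over Nat ----

theorem pvAddXorAnd (a b : Nat) : a + b = (a ^^^ b) + 2 * (a &&& b) := by
  induction a using Nat.strong_induction_on generalizing b with
  | _ a ih =>
    rcases Nat.eq_zero_or_pos a with rfl | ha
    · simp
    · have h1 := ih (a / 2) (by omega) (b / 2)
      have hx : (a ^^^ b) / 2 = a / 2 ^^^ b / 2 := Nat.xor_div_two
      have hy : (a &&& b) / 2 = a / 2 &&& b / 2 := Nat.and_div_two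
      have hx2 : (a ^^^ b) % 2 = (a + b) % 2 := Nat.xor_mod_two_eq
      have hy2 : (a &&& b) % 2 = 1 ↔ a % 2 = 1 ∧ b % 2 = 1 := Nat.and_mod_two_eq_one
      have e1 : a ^^^ b = 2 * ((a ^^^ b) / 2) + (a ^^^ b) % 2 := by omega
      have e2 : a &&& b = 2 * ((a &&& b) / 2) + (a &&& b) % 2 := by omega
      rw [hx] at e1; rw [hy] at e2
      omega

theorem pvXorEqAddIff (a b : Nat) : a ^^^ b = a + b ↔ a &&& b = 0 := by
  have := pvAddXorAnd a b; omega

theorem pvOrEqZero (a b : Nat) : a ||| b = 0 ↔ a = 0 ∧ b = 0 := by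
  constructor
  · intro h
    constructor <;> apply Nat.zero_of_testBit_eq_false <;> intro i <;>
      · have := congrArg (fun x => Nat.testBit x i) h
        simp at this
        simp [this]
  · rintro ⟨rfl, rfl⟩; rfl

theorem pvPowAddEqOr (k m : Nat) (h : m < 2 ^ k) : 2 ^ k + m = 2 ^ k ||| m := by
  apply Nat.eq_of_testBit_eq
  intro j
  rcases lt_trichotomy j k with hj | rfl | hj
  · rw [Nat.testBit_two_pow_add_gt hj, Nat.testBit_lor, Nat.testBit_two_pow]
    simp [Nat.ne_of_gt hj]
  · rw [Nat.testBit_two_pow_add_eq, Nat.testBit_lor, Nat.testBit_two_pow]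
    simp [Nat.testBit_eq_false_of_lt h]
  · have h1 : 2 ^ k + m < 2 ^ j := by
      have : 2 ^ (k+1) ≤ 2 ^ j := Nat.pow_le_pow_right (by norm_num) hj
      have := Nat.pow_succ 2 k
      omega
    rw [Nat.testBit_eq_false_of_lt h1, Nat.testBit_lor, Nat.testBit_two_pow]
    have : m < 2 ^ j := by
      have : 2 ^ k ≤ 2 ^ j := Nat.pow_le_pow_right (by norm_num) (le_of_lt hj)
      omega
    simp [Nat.testBit_eq_false_of_lt this, Nat.ne_of_lt hj]

theorem pvTestBitTrue (m e : Nat) (h1 : 2 ^ e ≤ m) (h2 : m < 2 ^ (e+1)) :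
    m.testBit e = true := by
  have h3 : (m.testBit e).toNat = m / 2 ^ e % 2 := Nat.toNat_testBit m e
  have h4 : m / 2 ^ e = 1 := by
    apply Nat.div_eq_of_lt_le (by omega)
    have := Nat.pow_succ 2 e
    omega
  rw [h4] at h3
  cases h : m.testBit e <;> simp [h] at h3 ⊢

theorem pvTestBitTwoMul (m e : Nat) : (2 * m).testBit (e+1) = m.testBit e := by
  rw [Nat.testBit_add_one]; congr 1; omega

-- the fibbinary condition
def pvP (n : Nat) : Bool := n &&& 2 * n == 0

-- counts
def pvF (e : Nat) : Nat := ((Finset.range (2 ^ e)).filter (fun n => pvP n = true)).card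
def pvCnt (k : Nat) : Nat := ((Finset.Icc 1 k).filter (fun n => pvP n = true)).card

-- A's test over Int equals pvP over Nat
theorem pvCondIff (k : Nat) :
    (PySem.Int.bxor (PySem.Int.bxor ((k : Nat) : Int) (2 * ((k : Nat) : Int))) (3 * ((k : Nat) : Int)) = 0)
      ↔ pvP k = true := by
  have h2 : (2 * ((k : Nat) : Int)) = ((2 * k : Nat) : Int) := by push_cast; ring
  have h3 : (3 * ((k : Nat) : Int)) = ((3 * k : Nat) : Int) := by push_cast; ring
  rw [h2, h3, PySem.Int.bxor_natCast, PySem.Int.bxor_natCast]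
  rw [show ((((k ^^^ 2 * k) ^^^ 3 * k : Nat) : Int) = 0) ↔ ((k ^^^ 2 * k) ^^^ 3 * k = 0) by exact_mod_cast Int.natCast_eq_zero]
  rw [Nat.xor_eq_zero_iff]
  have h4 : 3 * k = k + 2 * k := by ring
  rw [h4, pvXorEqAddIff]
  simp [pvP]

-- loop characterisation
theorem pvSolveGoEq (k : Nat) (lost : Int) : solveGo k lost = lost + (pvCnt k : Int) := by
  induction k generalizing lost with
  | zero => simp [solveGo, pvCnt]
  | succ k ih =>
    rw [solveGo, ih]
    have hnotmem : (k + 1) ∉ Finset.Icc 1 k := by simp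
    have hins : Finset.Icc 1 (k + 1) = insert (k + 1) (Finset.Icc 1 k) := by
      ext x; simp [Finset.mem_Icc]; omega
    have hcnt : pvCnt (k + 1) = pvCnt k + (if pvP (k+1) = true then 1 else 0) := by
      unfold pvCnt
      rw [hins, Finset.filter_insert]
      split_ifs with h
      · rw [Finset.card_insert_of_notMem (by simp)]
      · rfl
    have hcond := pvCondIff (k + 1)
    push_cast at hcond ⊢
    split_ifs with h
    · rw [hcnt]; simp [hcond.mp h]; ring
    · rw [hcnt]
      have : pvP (k+1) ≠ true := fun hh => h (hcond.mpr hh)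
      simp [this]

-- pvCnt at 2^e equals pvF e (swap the qualifying endpoints 0 and 2^e)
theorem pvPzero : pvP 0 = true := by decide

theorem pvPpow (e : Nat) : pvP (2 ^ e) = true := by
  have h : 2 * 2 ^ e = 2 ^ (e + 1) := by rw [Nat.pow_succ]; ring
  simp only [pvP, h, beq_iff_eq]
  rw [Nat.and_two_pow]
  simp

theorem pvCntPow (e : Nat) : pvCnt (2 ^ e) = pvF e := by
  have hpos : 0 < 2 ^ e := Nat.pow_pos (by norm_num)
  have h1 : Finset.Icc 1 (2 ^ e) = insert (2 ^ e) (Finset.Ico 1 (2 ^ e)) := by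
    ext x; simp [Finset.mem_Icc, Finset.mem_Ico]; omega
  have h2 : Finset.range (2 ^ e) = insert 0 (Finset.Ico 1 (2 ^ e)) := by
    ext x; simp [Finset.mem_range, Finset.mem_Ico]; omega
  unfold pvCnt pvF
  rw [h1, h2, Finset.filter_insert, Finset.filter_insert]
  rw [if_pos (pvPpow e), if_pos pvPzero]
  rw [Finset.card_insert_of_notMem (by simp), Finset.card_insert_of_notMem (by simp)]

-- the key bit lemma: for m < 2^(e+1), P (2^(e+1) + m) ↔ m < 2^e ∧ P m
theorem pvPshift (e m : Nat) (hm : m < 2 ^ (e + 1)) :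
    pvP (2 ^ (e + 1) + m) = true ↔ (m < 2 ^ e ∧ pvP m = true) := by
  have hmul : 2 * (2 ^ (e + 1) + m) = 2 ^ (e + 2) + 2 * m := by rw [Nat.pow_succ]; ring
  have hm2 : 2 * m < 2 ^ (e + 2) := by
    have : 2 ^ (e + 2) = 2 * 2 ^ (e + 1) := by rw [Nat.pow_succ]; ring
    omega
  simp only [pvP, beq_iff_eq] at *
  rw [hmul, pvPowAddEqOr _ _ hm, pvPowAddEqOr _ _ hm2]
  rw [Nat.and_or_distrib_right, Nat.and_or_distrib_left, Nat.and_or_distrib_left]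
  have e1 : 2 ^ (e + 1) &&& 2 ^ (e + 2) = 0 := by
    rw [Nat.and_two_pow]; simp
  have e2 : m &&& 2 ^ (e + 2) = 0 := by
    rw [Nat.and_two_pow]
    rw [Nat.testBit_eq_false_of_lt (by
      have : 2 ^ (e + 2) = 2 * 2 ^ (e + 1) := by rw [Nat.pow_succ]; ring
      omega)]
    simp
  have e3 : 2 ^ (e + 1) &&& 2 * m = (if m.testBit e then 2 ^ (e + 1) else 0) := by
    rw [Nat.land_comm, Nat.and_two_pow, pvTestBitTwoMul]
    cases m.testBit e <;> simp
  rw [e1, e2, e3]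
  simp only [Nat.zero_or]
  constructor
  · intro h
    rw [pvOrEqZero] at h
    obtain ⟨h3, h4⟩ := h
    refine ⟨?_, h4⟩
    by_contra hge
    push Not at hge
    rw [pvTestBitTrue m e (by omega) hm] at h3
    simp at h3
  · rintro ⟨hlt, hPm⟩
    rw [Nat.testBit_eq_false_of_lt hlt]
    simp [hPm]

-- the Fibonacci recurrence for pvF
theorem pvFrec (e : Nat) : pvF (e + 2) = pvF (e + 1) + pvF e := by
  have hsplit : (2 : Nat) ^ (e + 2) = 2 ^ (e + 1) + 2 ^ (e + 1) := by
    rw [Nat.pow_succ]; ring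
  unfold pvF
  rw [hsplit, Finset.range_add, Finset.filter_union, Finset.card_union_of_disjoint]
  · congr 1
    rw [Finset.filter_map, Finset.card_map]
    apply Finset.card_nbij' (fun m => m) (fun m => m)
    · intro m hm
      simp [addLeftEmbedding] at hm ⊢
      obtain ⟨hlt, hP⟩ := hm
      exact ⟨((pvPshift e m hlt).mp hP).1, ((pvPshift e m hlt).mp hP).2⟩
    · intro m hm
      simp [addLeftEmbedding] at hm ⊢
      obtain ⟨hlt, hP⟩ := hm
      have hlt' : m < 2 ^ (e + 1) := by
        have : (2:Nat) ^ e ≤ 2 ^ (e + 1) := Nat.pow_le_pow_right (by norm_num) (by omega)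
        omega
      exact ⟨hlt', (pvPshift e m hlt').mpr ⟨hlt, hP⟩⟩
    · intro m _; rfl
    · intro m _; rfl
  · apply Finset.disjoint_filter_filter
    simp only [Finset.disjoint_left]
    intro x hx hx2
    simp at hx
    simp [addLeftEmbedding] at hx2
    omega

theorem pvF0 : pvF 0 = 1 := by decide
theorem pvF1 : pvF 1 = 2 := by decide

-- fibGo computes consecutive pvF values
theorem pvFibGoEq (e : Nat) : fibGo (e + 1) = ((pvF e : Int), (pvF (e + 1) : Int)) := by
  induction e with
  | zero => simp [fibGo, pvF0, pvF1]
  | succ e ih =>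
    rw [fibGo, ih]
    simp [pvFrec e]
    ring

theorem pvSolveAltEq (e : Nat) : solve_alt (e : Int) = (pvF e : Int) := by
  unfold solve_alt
  rw [Int.toNat_natCast]
  cases e with
  | zero => simp [fibGo, pvF0]
  | succ e => rw [pvFibGoEq e]

-- ===== VERDICT (by name: the statement is the Claim_ definition above) =====
theorem solve_spec : Claim_equal_solve := by
  intro exponent _ hpre
  unfold Spec_solve
  have hexp : exponent = ((exponent.toNat : Nat) : Int) := by
    unfold Pre_solve at hpre; omega
  rw [hexp, pvSolveAltEq]
  unfold solve
  rw [pvSolveGoEq, Nat.one_shiftLeft]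
  rw [hexp, Int.toNat_natCast, pvCntPow]
  simp
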